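-- pv_equiv track=rewrite | github.com/austin02202016/filterlongform | my-app/server/chunk_transcript.py | chunk_by_qa
-- ===== SOURCE A (Python) =====
-- def chunk_by_qa(transcript_data, target_label="austin kennedy", interviewer_label="speaker a"):
--     """
--     Simple Q&A chunking for Austin Kennedy:
--       - Each time the Interviewer speaks, we consider that the end of Austin Kennedy's current chunk.
--       - Returns a list of text chunks (strings) for Austin Kennedy.
--     """
--     chunks = []
--     current_chunk = []
--
--     for (speaker, text) in transcript_data:
--         spk_lower = speaker.lower()
--
--         if interviewer_label in spk_lower:
--             # Interviewer just started speaking => end the current Austin chunk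
--             if current_chunk:
--                 chunks.append(" ".join(current_chunk))
--                 current_chunk = []
--         elif target_label in spk_lower:
--             # This is Austin Kennedy => accumulate his text
--             current_chunk.append(text)
--
--     # If there's any leftover Austin Kennedy text
--     if current_chunk:
--         chunks.append(" ".join(current_chunk))
--
--     return chunks
-- ===== SOURCE B (Python) =====
-- def chunk_by_qa(transcript_data, target_label="austin kennedy", interviewer_label="speaker a"):
--     # Split-then-filter: repeatedly search for the next interviewer line, cut
--     # the transcript there, and within each delimiter-free piece keep the
--     # target speaker's texts and join them (a piece with no target line emits
--     # nothing; one with a single empty text still emits "").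
--     chunks = []
--     rest = transcript_data
--     while rest:
--         for cut, (speaker, _text) in enumerate(rest):
--             if interviewer_label in speaker.lower():
--                 segment, rest = rest[:cut], rest[cut + 1:]
--                 break
--         else:
--             segment, rest = rest, []
--         texts = [text for (speaker, text) in segment
--                  if target_label in speaker.lower()]
--         if texts:
--             chunks.append(" ".join(texts))
--     return chunks
-- ===== Notes on version B (the rewrite author's own statement) =====
-- stated objective: alternative
-- what changed: Replaces A's single-pass state machine (running current_chunk flushed on interviewer lines) with a split-then-filter scheme: repeatedly search for the next interviewer delimiter, slice the transcript there, then filter/join the target texts of each delimiter-free slice.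
import Mathlib
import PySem

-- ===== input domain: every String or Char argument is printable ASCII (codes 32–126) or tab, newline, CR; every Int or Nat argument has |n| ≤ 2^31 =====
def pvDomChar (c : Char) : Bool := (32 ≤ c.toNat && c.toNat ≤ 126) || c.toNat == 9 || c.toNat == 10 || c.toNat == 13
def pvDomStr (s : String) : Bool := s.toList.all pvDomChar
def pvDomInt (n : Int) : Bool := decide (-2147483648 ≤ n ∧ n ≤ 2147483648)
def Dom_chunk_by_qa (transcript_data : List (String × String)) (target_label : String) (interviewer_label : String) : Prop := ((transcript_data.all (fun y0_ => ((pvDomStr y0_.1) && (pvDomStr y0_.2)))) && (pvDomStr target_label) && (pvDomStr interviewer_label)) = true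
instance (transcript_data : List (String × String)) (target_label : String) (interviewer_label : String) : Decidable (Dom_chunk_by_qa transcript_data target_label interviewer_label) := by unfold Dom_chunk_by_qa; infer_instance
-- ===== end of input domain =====

-- B replaces A's single-pass state machine (running current_chunk flushed at interviewer
-- lines) with a split-then-filter scheme: search for the next interviewer delimiter, slice
-- the transcript there, filter/join each delimiter-free slice; same result, different shape.

-- ===== PORT A =====
-- one iteration of A's loop over state (chunks, current_chunk)
def chunkStepA (target_label interviewer_label : String)
    (acc : List String × List String) (row : String × String) : List String × List String :=
  let spk_lower := PySem.Str.lower row.1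
  if PySem.Str.isIn interviewer_label spk_lower then
    if acc.2 ≠ [] then (acc.1 ++ [PySem.Str.join " " acc.2], []) else acc
  else if PySem.Str.isIn target_label spk_lower then
    (acc.1, acc.2 ++ [row.2])
  else acc

def chunk_by_qa (transcript_data : List (String × String)) (target_label : String) (interviewer_label : String) : List String :=
  let st := transcript_data.foldl (chunkStepA target_label interviewer_label) ([], [])
  if st.2 ≠ [] then st.1 ++ [PySem.Str.join " " st.2] else st.1

-- ===== PORT B =====
-- the 'for cut, (speaker, _text) in enumerate(rest): if interviewer in …: break / else:' search
def segCut (interviewer_label : String) : List (String × String) → Option Nat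
  | [] => none
  | row :: rest =>
    if PySem.Str.isIn interviewer_label (PySem.Str.lower row.1) then some 0
    else (segCut interviewer_label rest).map (· + 1)

-- the comprehension '[text for (speaker, text) in segment if target_label in speaker.lower()]'
def segTexts (target_label : String) (segment : List (String × String)) : List String :=
  (segment.filter (fun r => PySem.Str.isIn target_label (PySem.Str.lower r.1))).map Prod.snd

-- the while loop over 'rest'; rest[:cut] / rest[cut+1:] are take/drop (exact: 0 ≤ cut ≤ len)
def chunkGoB (target_label interviewer_label : String) (rest : List (String × String)) : List String :=
  match rest with
  | [] => []
  | r :: rs =>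
    match segCut interviewer_label (r :: rs) with
    | some cut =>
      let texts := segTexts target_label ((r :: rs).take cut)
      (if texts ≠ [] then [PySem.Str.join " " texts] else []) ++
        chunkGoB target_label interviewer_label ((r :: rs).drop (cut + 1))
    | none =>
      let texts := segTexts target_label (r :: rs)
      if texts ≠ [] then [PySem.Str.join " " texts] else []
termination_by rest.length
decreasing_by simp only [List.length_drop, List.length_cons]; omega

def chunk_by_qa_alt (transcript_data : List (String × String)) (target_label : String) (interviewer_label : String) : List String :=
  chunkGoB target_label interviewer_label transcript_data

-- ===== PRECONDITION & SPEC =====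
def Spec_chunk_by_qa (transcript_data : List (String × String)) (target_label : String) (interviewer_label : String) (out : List String) : Prop := out = chunk_by_qa_alt transcript_data target_label interviewer_label
instance (transcript_data : List (String × String)) (target_label : String) (interviewer_label : String) (out : List String) : Decidable (Spec_chunk_by_qa transcript_data target_label interviewer_label out) := by unfold Spec_chunk_by_qa; infer_instance

-- ===== CLAIM (what is proved, stated in full; the proofs are below) =====
def Claim_equal_chunk_by_qa : Prop := ∀ (transcript_data : List (String × String)) (target_label : String) (interviewer_label : String), Dom_chunk_by_qa transcript_data target_label interviewer_label → Spec_chunk_by_qa transcript_data target_label interviewer_label (chunk_by_qa transcript_data target_label interviewer_label)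

-- ===== LEMMAS AND PROOFS =====

-- emit a chunk iff the collected texts are non-empty
def emitC (l : List String) : List String :=
  if l ≠ [] then [PySem.Str.join " " l] else []

-- reference middle form: A's loop written as structural recursion with carry 'cur'
def G (t i : String) : List String → List (String × String) → List String
  | cur, [] => emitC cur
  | cur, row :: rest =>
    if PySem.Str.isIn i (PySem.Str.lower row.1) then
      emitC cur ++ G t i [] rest
    else if PySem.Str.isIn t (PySem.Str.lower row.1) then
      G t i (cur ++ [row.2]) rest
    else G t i cur rest

-- B's loop body with the first slice's texts pre-seeded by 'cur'
def chunkWith (t i : String) (cur : List String) (td : List (String × String)) : List String :=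
  match segCut i td with
  | none => emitC (cur ++ segTexts t td)
  | some c => emitC (cur ++ segTexts t (td.take c)) ++ chunkGoB t i (td.drop (c + 1))

theorem goB_eq_chunkWith (t i : String) (td : List (String × String)) :
    chunkGoB t i td = chunkWith t i [] td := by
  cases td with
  | nil => unfold chunkGoB; simp [chunkWith, segCut, emitC, segTexts]
  | cons r rs =>
    unfold chunkGoB chunkWith
    cases segCut i (r :: rs) <;> simp [emitC]

theorem G_eq_chunkWith (t i : String) (td : List (String × String)) :
    ∀ cur, G t i cur td = chunkWith t i cur td := by
  induction td with
  | nil => intro cur; simp [G, chunkWith, segCut, segTexts]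
  | cons row rest ih =>
    intro cur
    by_cases hI : PySem.Chars.isIn i.toList (PySem.Chars.lower row.1.toList) = true
    · -- delimiter row: cut = 0
      rw [show G t i cur (row :: rest) = emitC cur ++ G t i [] rest from by simp [G, hI],
          ih [], ← goB_eq_chunkWith]
      unfold chunkWith
      rw [show segCut i (row :: rest) = some 0 from by simp [segCut, hI]]
      simp [segTexts, emitC]
    · by_cases hT : PySem.Chars.isIn t.toList (PySem.Chars.lower row.1.toList) = true
      · rw [show G t i cur (row :: rest) = G t i (cur ++ [row.2]) rest from by
              simp [G, hI, hT], ih]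
        unfold chunkWith
        rw [show segCut i (row :: rest) = (segCut i rest).map (· + 1) from by simp [segCut, hI]]
        cases hc : segCut i rest with
        | none => simp [segTexts, hT, List.append_assoc]
        | some c => simp [segTexts, hT, List.append_assoc]
      · rw [show G t i cur (row :: rest) = G t i cur rest from by simp [G, hI, hT], ih]
        unfold chunkWith
        rw [show segCut i (row :: rest) = (segCut i rest).map (· + 1) from by simp [segCut, hI]]
        cases hc : segCut i rest with
        | none => simp [segTexts, hT]
        | some c => simp [segTexts, hT]

theorem A_inv (t i : String) (td : List (String × String)) :
    ∀ (chunks cur : List String),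
      (let st := td.foldl (chunkStepA t i) (chunks, cur)
       if st.2 ≠ [] then st.1 ++ [PySem.Str.join " " st.2] else st.1)
        = chunks ++ G t i cur td := by
  induction td with
  | nil =>
    intro chunks cur
    by_cases h : cur = [] <;> simp [G, emitC, h]
  | cons row rest ih =>
    intro chunks cur
    rw [List.foldl_cons]
    by_cases hI : PySem.Chars.isIn i.toList (PySem.Chars.lower row.1.toList) = true
    · by_cases hc : cur = []
      · subst hc
        rw [show chunkStepA t i (chunks, []) row = (chunks, []) from by simp [chunkStepA, hI]]
        rw [ih chunks []]
        simp [G, hI, emitC]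
      · rw [show chunkStepA t i (chunks, cur) row
              = (chunks ++ [PySem.Str.join " " cur], []) from by simp [chunkStepA, hI, hc]]
        rw [ih (chunks ++ [PySem.Str.join " " cur]) []]
        simp [G, hI, emitC, hc]
    · by_cases hT : PySem.Chars.isIn t.toList (PySem.Chars.lower row.1.toList) = true
      · rw [show chunkStepA t i (chunks, cur) row = (chunks, cur ++ [row.2]) from by
              simp [chunkStepA, hI, hT]]
        rw [ih chunks (cur ++ [row.2])]
        simp [G, hI, hT]
      · rw [show chunkStepA t i (chunks, cur) row = (chunks, cur) from by
              simp [chunkStepA, hI, hT]]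
        rw [ih chunks cur]
        simp [G, hI, hT]

-- ===== VERDICT (by name: the statement is the Claim_ definition above) =====
theorem chunk_by_qa_spec : Claim_equal_chunk_by_qa := by
  intro td t i _
  show chunk_by_qa td t i = chunk_by_qa_alt td t i
  have h := A_inv t i td [] []
  rw [chunk_by_qa_alt, goB_eq_chunkWith, ← G_eq_chunkWith]
  simpa [chunk_by_qa] using h
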